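-- pv_equiv track=rewrite | github.com/EricHayter/logic-cli | logic/function_parser.py | init_symbols
-- ===== SOURCE A (Python) =====
-- from typing import Dict
--
-- def init_symbols(proposition: str) -> dict:
--     """
--         Assigns each of the uppercase letters a location in the symbols
--         instance dictionary for symbols to be reused for reoccuring symbols
--         """
--     symbols: Dict[str, bool | None ] = {}
--     for symbol in proposition:
--         if "A" <= symbol <= "Z":
--             if symbol not in symbols:
--                 symbols[symbol] = True
--         elif symbol not in [
--                     "~",
--                     "(",
--                     ")",
--                     ".",
--                     "+",
--                     ]:
--             idx = proposition.index(symbol)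
--             raise ValueError(f"Invalid symbol at position {idx}")
--     return symbols
-- ===== SOURCE B (Python) =====
-- import re
--
-- def init_symbols(proposition: str) -> dict:
--     m = re.search(r"[^A-Z~().+]", proposition)
--     if m:
--         raise ValueError(f"Invalid symbol at position {m.start()}")
--     return {c: True for c in re.findall(r"[A-Z]", proposition)}
-- ===== Notes on version B (the rewrite author's own statement) =====
-- stated objective: idiomatic
-- what changed: Replaced the manual per-character classify/branch loop (with a dict-membership-guarded insert and a proposition.index call to locate the error) by regex: re.search for the leftmost character outside the allowed class raises the same ValueError, and a dict comprehension over re.findall of the uppercase letters builds the same first-occurrence-ordered symbol dict.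
import Mathlib
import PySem

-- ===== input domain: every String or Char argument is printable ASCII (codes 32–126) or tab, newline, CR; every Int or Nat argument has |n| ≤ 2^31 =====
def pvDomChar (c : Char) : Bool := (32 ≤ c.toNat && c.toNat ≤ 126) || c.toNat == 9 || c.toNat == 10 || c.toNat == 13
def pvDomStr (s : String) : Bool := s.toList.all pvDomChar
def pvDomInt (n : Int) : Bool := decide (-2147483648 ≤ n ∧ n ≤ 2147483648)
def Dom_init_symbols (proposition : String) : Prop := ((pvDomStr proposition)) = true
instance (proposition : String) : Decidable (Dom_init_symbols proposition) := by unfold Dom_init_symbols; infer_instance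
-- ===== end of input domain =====

-- B replaces A's manual per-character classify loop by regex-style search + findall with a
-- dict comprehension (idiomatic, same cost). On invalid input both raise the same ValueError
-- (excluded by Pre_); the ports return [] on that path (none = raise).

-- ===== PORT A =====
-- the loop of A: classify each character in order; uppercase → guarded insert, operator → skip,
-- anything else → ValueError (modelled as none)
def initSymLoopA : List Char → PySem.Dict String Bool → Option (PySem.Dict String Bool)
  | [], d => some d
  | c :: rest, d =>
    if 'A' ≤ c ∧ c ≤ 'Z' then
      initSymLoopA rest (if d.contains (String.ofList [c]) then d else d.insert (String.ofList [c]) true)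
    else if c = '~' ∨ c = '(' ∨ c = ')' ∨ c = '.' ∨ c = '+' then
      initSymLoopA rest d
    else
      none  -- proposition.index(symbol); raise ValueError

def init_symbols (proposition : String) : List (String × Bool) :=
  match initSymLoopA proposition.toList PySem.Dict.empty with
  | some d => d.items
  | none => []

-- ===== PORT B =====
-- re.search(r"[^A-Z~().+]", proposition): leftmost character outside the class
def bInvalid (c : Char) : Bool := !((('A' ≤ c && c ≤ 'Z')) || c == '~' || c == '(' || c == ')' || c == '.' || c == '+')

def init_symbols_alt (proposition : String) : List (String × Bool) :=
  match proposition.toList.findIdx? bInvalid with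
  | some _ => []  -- raise ValueError(f"Invalid symbol at position {m.start()}")
  | none =>
    -- {c: True for c in re.findall(r"[A-Z]", proposition)}
    ((proposition.toList.filter (fun c => 'A' ≤ c && c ≤ 'Z')).foldl
      (fun d c => d.insert (String.ofList [c]) true) PySem.Dict.empty).items

-- ===== PRECONDITION & SPEC =====
-- Pre_ excludes exactly the inputs on which A raises ValueError (a character outside A-Z~().+)
def Pre_init_symbols (proposition : String) : Prop :=
  (proposition.toList.all (fun c =>
    ('A' ≤ c && c ≤ 'Z') || c == '~' || c == '(' || c == ')' || c == '.' || c == '+')) = true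
instance (proposition : String) : Decidable (Pre_init_symbols proposition) := by
  unfold Pre_init_symbols; infer_instance

def pvWitness_init_symbols : String := "A.(B+A)~C"

def Spec_init_symbols (proposition : String) (out : List (String × Bool)) : Prop :=
  out = init_symbols_alt proposition
instance (proposition : String) (out : List (String × Bool)) : Decidable (Spec_init_symbols proposition out) := by
  unfold Spec_init_symbols; infer_instance

-- ===== CLAIM (what is proved, stated in full; the proofs are below) =====
def Claim_equal_init_symbols : Prop := ∀ (proposition : String), Dom_init_symbols proposition → Pre_init_symbols proposition → Spec_init_symbols proposition (init_symbols proposition)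

-- ===== LEMMAS AND PROOFS =====

-- inserting the value a dict already holds at a key changes nothing (all values here are true)
theorem insert_true_of_contains (d : PySem.Dict String Bool)
    (hv : ∀ p ∈ d.items, p.2 = true) (k : String) (hc : d.contains k = true) :
    d.insert k true = d := by
  apply PySem.Dict.ext
  rw [PySem.Dict.items_insert_of_contains (d := d) (k := k) (v := true) hc]
  have : ∀ p ∈ d.items, (if p.1 == k then (k, true) else p) = p := by
    intro p hp
    by_cases h : p.1 = k
    · have hpt := hv p hp
      obtain ⟨p1, p2⟩ := p
      simp_all
    · simp [h]
  calc d.items.map (fun p => if p.1 == k then (k, true) else p)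
      = d.items.map id := List.map_congr_left (by intro p hp; simpa using this p hp)
    _ = d.items := List.map_id _

-- A's loop on all-valid input equals B's fold over the filtered uppercase characters
theorem loopA_eq_fold (cs : List Char) :
    ∀ d : PySem.Dict String Bool, (∀ p ∈ d.items, p.2 = true) →
    (∀ c ∈ cs, ('A' ≤ c ∧ c ≤ 'Z') ∨ c = '~' ∨ c = '(' ∨ c = ')' ∨ c = '.' ∨ c = '+') →
    initSymLoopA cs d =
      some ((cs.filter (fun c => 'A' ≤ c && c ≤ 'Z')).foldl
        (fun d c => d.insert (String.ofList [c]) true) d) := by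
  induction cs with
  | nil => intro d _ _; simp [initSymLoopA]
  | cons c rest ih =>
    intro d hv hval
    have hc := hval c (by simp)
    by_cases hup : 'A' ≤ c ∧ c ≤ 'Z'
    · have hfilter : (c :: rest).filter (fun c => 'A' ≤ c && c ≤ 'Z')
          = c :: rest.filter (fun c => 'A' ≤ c && c ≤ 'Z') := by
        simp [hup.1, hup.2]
      rw [hfilter]
      simp only [initSymLoopA, if_pos hup, List.foldl_cons]
      by_cases hct : d.contains (String.ofList [c]) = true
      · rw [if_pos hct, insert_true_of_contains d hv (String.ofList [c]) hct]
        exact ih d hv (fun x hx => hval x (by simp [hx]))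
      · rw [if_neg hct]
        refine ih _ ?_ (fun x hx => hval x (by simp [hx]))
        intro p hp
        rcases (PySem.Dict.mem_items_insert _ _ _ _).mp hp with h | h
        · simp [h]
        · exact hv p h.1
    · have hop : c = '~' ∨ c = '(' ∨ c = ')' ∨ c = '.' ∨ c = '+' := by tauto
      have hfilter : (c :: rest).filter (fun c => 'A' ≤ c && c ≤ 'Z')
          = rest.filter (fun c => 'A' ≤ c && c ≤ 'Z') := by
        have : ¬(('A' ≤ c : Bool) && (c ≤ 'Z' : Bool)) = true := by
          simp only [Bool.and_eq_true, decide_eq_true_eq]; exact hup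
        simp [this]
      rw [hfilter]
      simp only [initSymLoopA, if_neg hup, if_pos hop]
      exact ih d hv (fun x hx => hval x (by simp [hx]))

-- under Pre_, B's search finds no invalid character
theorem pre_forall (proposition : String) (h : Pre_init_symbols proposition) :
    ∀ c ∈ proposition.toList, ('A' ≤ c ∧ c ≤ 'Z') ∨ c = '~' ∨ c = '(' ∨ c = ')' ∨ c = '.' ∨ c = '+' := by
  intro c hc
  have := (List.all_eq_true.mp h) c hc
  simp only [Bool.or_eq_true, Bool.and_eq_true, decide_eq_true_eq, beq_iff_eq] at this
  tauto

theorem findIdx_none_of_pre (proposition : String) (h : Pre_init_symbols proposition) :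
    proposition.toList.findIdx? bInvalid = none := by
  rw [List.findIdx?_eq_none_iff]
  intro c hc
  have := pre_forall proposition h c hc
  simp only [bInvalid]
  rcases this with ⟨h1, h2⟩ | h | h | h | h | h <;>
    simp_all

-- ===== VERDICT (by name: the statement is the Claim_ definition above) =====
theorem init_symbols_spec : Claim_equal_init_symbols := by
  intro proposition _ hpre
  unfold Spec_init_symbols init_symbols init_symbols_alt
  rw [findIdx_none_of_pre proposition hpre,
      loopA_eq_fold proposition.toList PySem.Dict.empty (by simp [PySem.Dict.empty])
        (pre_forall proposition hpre)]
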